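-- pv_equiv track=rewrite | github.com/abstractqqq/my_analysis_toolkit | text_data.py | _reverse_memo
-- ===== SOURCE A (Python) =====
-- def _reverse_memo(memo:dict[str, str]) -> dict[str, list[str]]:
--     '''Reverse the memo used in transform_text_data.
--
--         Returns:
--             the mapping between stemmed words and the many versions of the word that get stemmed to the same "root".
--
--     '''
--     output:dict[str, list[str]] = {}
--     for key, item in memo.items():
--         if item in output:
--             output[item].append(key)
--         else:
--             output[item] = [key]
--
--     return output
-- ===== SOURCE B (Python) =====
-- def _reverse_memo(memo: dict[str, str]) -> dict[str, list[str]]: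
--     stems = dict.fromkeys(memo.values())
--     return {v: [k for k, x in memo.items() if x == v] for v in stems}
-- ===== Notes on version B (the rewrite author's own statement) =====
-- stated objective: idiomatic
-- what changed: B replaces A's incremental dict-of-lists accumulation by a two-phase comprehension: dedup the values in first-occurrence order with dict.fromkeys, then build each group's key list with one filtering pass per stem.
import Mathlib
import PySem

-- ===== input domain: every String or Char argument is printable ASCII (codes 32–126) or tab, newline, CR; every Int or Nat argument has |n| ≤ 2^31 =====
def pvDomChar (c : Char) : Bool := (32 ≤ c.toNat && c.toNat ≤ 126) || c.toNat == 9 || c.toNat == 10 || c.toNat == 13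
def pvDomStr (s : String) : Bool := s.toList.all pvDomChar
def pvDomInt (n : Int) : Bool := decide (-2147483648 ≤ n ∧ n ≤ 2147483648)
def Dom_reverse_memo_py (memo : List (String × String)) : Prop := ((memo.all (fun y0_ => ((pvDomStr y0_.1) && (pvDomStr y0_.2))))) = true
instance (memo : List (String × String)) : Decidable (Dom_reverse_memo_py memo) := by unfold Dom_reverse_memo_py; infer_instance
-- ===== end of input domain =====

-- B inverts the memo by first dedupping the values in first-occurrence order, then collecting
-- each stem's keys with one filtering pass; same result, a two-phase instead of incremental build.

-- ===== PORT A =====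
-- literal port of A's loop: output = {}; for key, item: if item in output: append else new list
def reverse_memo_py (memo : List (String × String)) : List (String × List String) :=
  (memo.foldl
    (fun (output : PySem.Dict String (List String)) kv =>
      if output.contains kv.2 then
        output.modify kv.2 [] (fun l => l ++ [kv.1])
      else
        output.insert kv.2 [kv.1])
    PySem.Dict.empty).items

-- ===== PORT B =====
-- port of Source B: stems = dict.fromkeys(memo.values()) (= distinct values, first-occurrence order),
-- then {v: [k for k, x in memo.items() if x == v] for v in stems}
def reverse_memo_py_alt (memo : List (String × String)) : List (String × List String) :=
  (PySem.Set.ofList (memo.map Prod.snd)).map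
    (fun v => (v, (memo.filter (fun p => p.2 == v)).map Prod.fst))

-- ===== PRECONDITION & SPEC =====
def Spec_reverse_memo_py (memo : List (String × String)) (out : List (String × List String)) : Prop := out = reverse_memo_py_alt memo
instance (memo : List (String × String)) (out : List (String × List String)) : Decidable (Spec_reverse_memo_py memo out) := by unfold Spec_reverse_memo_py; infer_instance

-- ===== CLAIM (what is proved, stated in full; the proofs are below) =====
def Claim_equal_reverse_memo_py : Prop := ∀ (memo : List (String × String)), Dom_reverse_memo_py memo → Spec_reverse_memo_py memo (reverse_memo_py memo)

-- ===== LEMMAS AND PROOFS =====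

-- A's branching step IS Python's d.modify (contains-test + append vs fresh singleton)
theorem stepA_eq_modify (d : PySem.Dict String (List String)) (kv : String × String) :
    (if d.contains kv.2 then d.modify kv.2 [] (fun l => l ++ [kv.1])
     else d.insert kv.2 [kv.1]) = d.modify kv.2 [] (fun l => l ++ [kv.1]) := by
  by_cases h : d.contains kv.2
  · simp [h]
  · simp only [h, if_false, Bool.false_eq_true]
    unfold PySem.Dict.modify
    rw [PySem.Dict.getD_of_not_contains d [] (by simpa using h)]
    rfl

theorem foldA_eq (memo : List (String × String)) :
    memo.foldl
      (fun (output : PySem.Dict String (List String)) kv =>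
        if output.contains kv.2 then output.modify kv.2 [] (fun l => l ++ [kv.1])
        else output.insert kv.2 [kv.1]) PySem.Dict.empty
    = (memo.map Prod.swap).foldl
        (fun (d : PySem.Dict String (List String)) p => d.modify p.1 [] (fun l => l ++ [p.2]))
        PySem.Dict.empty := by
  rw [List.foldl_map]
  congr 1
  funext d kv
  exact stepA_eq_modify d kv

theorem swap_filter_map (memo : List (String × String)) (v : String) :
    ((memo.map Prod.swap).filter (fun p => p.1 == v)).map Prod.snd
      = (memo.filter (fun p => p.2 == v)).map Prod.fst := by
  rw [List.filter_map, List.map_map]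
  rfl

theorem reverse_memo_eq (memo : List (String × String)) :
    reverse_memo_py memo = reverse_memo_py_alt memo := by
  unfold reverse_memo_py reverse_memo_py_alt
  rw [foldA_eq]
  set l := memo.map Prod.swap with hl
  have hnd : ((l.foldl (fun (d : PySem.Dict String (List String)) p =>
      d.modify p.1 [] (fun s => s ++ [p.2])) PySem.Dict.empty)).keys.Nodup := by
    exact PySem.Dict.nodup_keys_foldl_modify_key l Prod.fst []
      (fun d p => fun s => s ++ [p.2]) PySem.Dict.empty (by simp)
  rw [PySem.Dict.items_eq_map_keys _ hnd []]
  have hkeys : ((l.foldl (fun (d : PySem.Dict String (List String)) p =>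
      d.modify p.1 [] (fun s => s ++ [p.2])) PySem.Dict.empty)).keys
      = PySem.Set.ofList (memo.map Prod.snd) := by
    rw [PySem.Dict.keys_foldl_modify_key]
    have : l.map Prod.fst = memo.map Prod.snd := by
      rw [hl, List.map_map]; rfl
    rw [this]
    rw [PySem.Dict.keys_empty, PySem.Set.update_nil_left]
  rw [hkeys]
  apply List.map_congr_left
  intro v _
  have hg := PySem.Dict.getD_foldl_modify_append (d := (PySem.Dict.empty : PySem.Dict String (List String))) (l := l) (c := v)
  rw [hg, PySem.Dict.getD_empty, List.nil_append, swap_filter_map]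

-- ===== VERDICT (by name: the statement is the Claim_ definition above) =====
theorem reverse_memo_py_spec : Claim_equal_reverse_memo_py := by
  intro memo _
  unfold Spec_reverse_memo_py
  exact reverse_memo_eq memo
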